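-- pv_equiv track=rewrite | github.com/akhilm91/AlgoExpert-interview-questions | Sorted-Squared-Array/solution.py | sortedSquaredArray1
-- ===== SOURCE A (Python) =====
-- def sortedSquaredArray1(array):
--     # Write your code here.
--     output = []
--     left, right = 0, len(array)-1
--     while left <= right:
--         if abs(array[left]) < abs(array[right]):
--             output.insert(0, array[right]**2)
--             right = right-1
--         else:
--             output.insert(0, array[left]**2)
--             left = left+1
--     return output
-- ===== SOURCE B (Python) =====
-- def sortedSquaredArray1(array):
--     return sorted(x * x for x in array)
-- ===== Notes on version B (the rewrite author's own statement) =====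
-- stated objective: faster
-- what changed: B squares every element and hands the list to the built-in sort instead of running A's two-pointer merge from the ends with repeated insert(0); Pre_ admits every list whose |values| attain each slice's maximum at an endpoint (all sorted arrays -- the problem statement supplies a sorted array, so this is the task's natural domain -- plus reverse-sorted ones), and excludes lists with an interior |.|-peak, outside the stated domain, where neither output order is specified and the two programs order the squares differently.
-- outside the precondition, e.g. on sortedSquaredArray1([1, 3, 2]): A returns [1, 9, 4], B returns [1, 4, 9]; on sortedSquaredArray1([1, 67, -1, 6, 2]): A returns [1, 4489, 1, 36, 4], B returns [1, 1, 4, 36, 4489]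
import Mathlib
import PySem

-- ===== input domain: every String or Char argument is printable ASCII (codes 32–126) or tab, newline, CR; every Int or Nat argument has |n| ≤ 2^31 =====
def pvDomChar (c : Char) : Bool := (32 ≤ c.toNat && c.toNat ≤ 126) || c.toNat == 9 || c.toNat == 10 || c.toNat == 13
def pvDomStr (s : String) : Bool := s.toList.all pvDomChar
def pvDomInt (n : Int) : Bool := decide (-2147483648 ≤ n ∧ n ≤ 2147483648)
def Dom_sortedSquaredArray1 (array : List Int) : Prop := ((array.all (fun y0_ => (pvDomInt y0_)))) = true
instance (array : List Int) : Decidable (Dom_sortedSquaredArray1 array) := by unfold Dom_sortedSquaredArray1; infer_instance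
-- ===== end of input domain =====

-- B sorts the squared elements with the library sort instead of A's two-pointer merge with insert(0); measured faster (O(n log n) vs O(n^2)).


-- ===== PORT A =====
-- while loop of A: prepend the square of the end with larger |·| (ties: left), move that pointer inward.
-- array[left]/array[right] are always in range when the loop body runs, so getD 0 is exact.
def pvGoA (array : List Int) (left right : Int) (output : List Int) : List Int :=
  if _h : left ≤ right then
    let l := (PySem.List.pyGet? array left).getD 0
    let r := (PySem.List.pyGet? array right).getD 0
    if |l| < |r| then
      pvGoA array left (right - 1) (r ^ 2 :: output)
    else
      pvGoA array (left + 1) right (l ^ 2 :: output)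
  else output
termination_by (right + 1 - left).toNat
decreasing_by all_goals omega

def sortedSquaredArray1 (array : List Int) : List Int :=
  pvGoA array 0 ((array.length : Int) - 1) []

-- ===== PORT B =====
-- return sorted(x * x for x in array)
def sortedSquaredArray1_alt (array : List Int) : List Int :=
  PySem.List.sorted (array.map (fun x => x * x)) (fun x => x) false

-- ===== PRECONDITION & SPEC =====
-- Pre_ admits every list in which each contiguous slice attains its maximum |value| at an endpoint
-- (in particular every sorted array — the problem statement supplies a sorted array, so this is the
-- task's natural domain — and every reverse-sorted one); it excludes lists with an interior |·|-peak,
-- inputs outside the stated domain, on which neither output order is specified and the two programs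
-- order the squares differently (e.g. [1,3,2]: A gives [1,9,4], B gives [1,4,9]).
def Pre_sortedSquaredArray1 (array : List Int) : Prop :=
  ∀ k < array.length, ∀ j < k + 1, ∀ i < j + 1,
    |array.getD j 0| ≤ max |array.getD i 0| |array.getD k 0|
instance (array : List Int) : Decidable (Pre_sortedSquaredArray1 array) := by unfold Pre_sortedSquaredArray1; infer_instance
def pvWitness_sortedSquaredArray1 : List Int := [-4, 1, 2, 3]

def Spec_sortedSquaredArray1 (array : List Int) (out : List Int) : Prop := out = sortedSquaredArray1_alt array
instance (array : List Int) (out : List Int) : Decidable (Spec_sortedSquaredArray1 array out) := by unfold Spec_sortedSquaredArray1; infer_instance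

-- ===== CLAIM (what is proved, stated in full; the proofs are below) =====
def Claim_equal_sortedSquaredArray1 : Prop := ∀ (array : List Int), Dom_sortedSquaredArray1 array → Pre_sortedSquaredArray1 array → Spec_sortedSquaredArray1 array (sortedSquaredArray1 array)

-- ===== LEMMAS AND PROOFS =====

-- A's loop builds its result in front of the accumulator.
theorem pvGoA_append (array : List Int) (left right : Int) (output : List Int) :
    pvGoA array left right output = pvGoA array left right [] ++ output := by
  induction h : (right + 1 - left).toNat using Nat.strong_induction_on
    generalizing left right output with
  | _ n ih =>
    unfold pvGoA
    split
    · dsimp only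
      split
      · rw [ih ((right - 1) + 1 - left).toNat (by omega) left (right - 1) _ rfl,
          ih ((right - 1) + 1 - left).toNat (by omega) left (right - 1)
            ((_ : Int) ^ 2 :: []) rfl]
        simp
      · rw [ih (right + 1 - (left + 1)).toNat (by omega) (left + 1) right _ rfl,
          ih (right + 1 - (left + 1)).toNat (by omega) (left + 1) right
            ((_ : Int) ^ 2 :: []) rfl]
        simp
    · simp

-- A smaller |value| gives a smaller square.
theorem pvSqLe (x c : Int) (h : |x| ≤ |c|) : x * x ≤ c * c := by
  have := mul_le_mul h h (abs_nonneg x) (abs_nonneg c)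
  rwa [abs_mul_abs_self, abs_mul_abs_self] at this

-- Main invariant: on an array whose slices attain their max |value| at an endpoint,
-- A's loop on [l, r] returns a sorted permutation
-- of the squares of the elements with indices in [l, r].
theorem pvGoA_main (array : List Int)
    (hv : ∀ i j k : Nat, i ≤ j → j ≤ k → k < array.length →
      |array.getD j 0| ≤ max |array.getD i 0| |array.getD k 0|) :
    ∀ n l r : Nat, r + 1 - l ≤ n → l ≤ r → r < array.length →
    (pvGoA array l r []).Perm
      ((List.range' l (r + 1 - l)).map (fun k => array.getD k 0 * array.getD k 0)) ∧
    (pvGoA array l r []).Pairwise (· ≤ ·) := by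
  intro n
  induction n with
  | zero => intro l r hn hl hr; omega
  | succ n ih =>
    intro l r hn hl hr
    have hln : l < array.length := by omega
    have hgl : (PySem.List.pyGet? array (l : Int)).getD 0 = array[l] := by
      simp [PySem.List.pyGet?_natCast, List.getElem?_eq_getElem hln]
    have hgr : (PySem.List.pyGet? array (r : Int)).getD 0 = array[r] := by
      simp [PySem.List.pyGet?_natCast, List.getElem?_eq_getElem hr]
    -- membership in the mapped range
    have hmem : ∀ (a b : Nat) (y : Int), b < array.length →
        y ∈ (List.range' a (b + 1 - a)).map (fun k => array.getD k 0 * array.getD k 0) →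
        ∃ k, a ≤ k ∧ k ≤ b ∧ ∃ hk : k < array.length, y = array[k] * array[k] := by
      intro a b y hb hy
      rcases List.mem_map.mp hy with ⟨k, hk, hky⟩
      rcases List.mem_range'_1.mp hk with ⟨hk1, hk2⟩
      refine ⟨k, hk1, by omega, by omega, ?_⟩
      rw [← hky, List.getD_eq_getElem array 0 (by omega)]
    unfold pvGoA
    rw [dif_pos (by exact_mod_cast hl)]
    dsimp only
    rw [hgl, hgr]
    by_cases hc : |array[l]'hln| < |array[r]| <;> simp only [hc, if_true, if_false]
    · -- take the right end
      have hlr : l < r := by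
        rcases Nat.lt_or_ge l r with h | h
        · exact h
        · exfalso; have : l = r := by omega
          subst this; exact absurd hc (lt_irrefl _)
      have hcast : (r : Int) - 1 = ((r - 1 : Nat) : Int) := by omega
      rw [hcast, pvGoA_append]
      obtain ⟨ihp, ihs⟩ := ih l (r - 1) (by omega) (by omega) (by omega)
      have hb : ∀ y ∈ pvGoA array (l : Int) ((r - 1 : Nat) : Int) [],
          y ≤ array[r] * array[r] := by
        intro y hy
        rcases hmem l (r - 1) y (by omega) (ihp.mem_iff.mp hy) with ⟨k, hk1, hk2, hk3, hky⟩
        subst hky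
        refine pvSqLe _ _ ?_
        have hvv := hv l k r hk1 (by omega) hr
        rw [List.getD_eq_getElem array 0 hk3, List.getD_eq_getElem array 0 hln,
          List.getD_eq_getElem array 0 hr] at hvv
        have hm : max |array[l]'hln| |array[r]| = |array[r]| :=
          max_eq_right (le_of_lt hc)
        omega
      constructor
      · have hsplit : List.range' l (r + 1 - l) = List.range' l (r - l) ++ [r] := by
          have : r + 1 - l = (r - l) + 1 := by omega
          rw [this, List.range'_1_concat]
          congr 2; omega
        rw [hsplit, List.map_append]
        refine List.Perm.append ?_ ?_
        · have : r - 1 + 1 - l = r - l := by omega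
          rw [this] at ihp; exact ihp
        · simp [List.getD, List.getElem?_eq_getElem hr, pow_two]
      · rw [List.pairwise_append]
        refine ⟨ihs, by simp, ?_⟩
        intro y hy z hz
        simp only [List.mem_singleton] at hz
        subst hz
        calc y ≤ array[r] * array[r] := hb y hy
          _ = array[r] ^ 2 := (pow_two _).symm
    · -- take the left end (ties included)
      rw [not_lt] at hc
      rw [pvGoA_append]
      have hcast : (l : Int) + 1 = ((l + 1 : Nat) : Int) := by omega
      rw [hcast]
      rcases Nat.lt_or_ge l r with hlr | hlr
      · obtain ⟨ihp, ihs⟩ := ih (l + 1) r (by omega) (by omega) hr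
        have hb : ∀ y ∈ pvGoA array ((l + 1 : Nat) : Int) (r : Int) [],
            y ≤ array[l] * array[l] := by
          intro y hy
          rcases hmem (l + 1) r y hr (ihp.mem_iff.mp hy) with ⟨k, hk1, hk2, hk3, hky⟩
          subst hky
          refine pvSqLe _ _ ?_
          have hvv := hv l k r (by omega) hk2 hr
          rw [List.getD_eq_getElem array 0 hk3, List.getD_eq_getElem array 0 hln,
            List.getD_eq_getElem array 0 hr] at hvv
          have hm : max |array[l]'hln| |array[r]| = |array[l]'hln| := max_eq_left hc
          omega
        constructor
        · have hsplit : List.range' l (r + 1 - l) = l :: List.range' (l + 1) (r + 1 - (l + 1)) := by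
            have : r + 1 - l = (r + 1 - (l + 1)) + 1 := by omega
            rw [this, List.range'_succ]
          rw [hsplit, List.map_cons]
          refine (List.perm_append_singleton _ _).trans ?_
          have heq : array.getD l 0 * array.getD l 0 = array[l]'hln ^ 2 := by
            simp [List.getD, List.getElem?_eq_getElem hln, pow_two]
          rw [heq]
          exact ihp.cons _
        · rw [List.pairwise_append]
          refine ⟨ihs, by simp, ?_⟩
          intro y hy z hz
          simp only [List.mem_singleton] at hz
          subst hz
          calc y ≤ array[l] * array[l] := hb y hy
            _ = array[l] ^ 2 := (pow_two _).symm
      · -- l = r: inner call returns []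
        have hle : l = r := by omega
        subst hle
        have hempty : pvGoA array ((l + 1 : Nat) : Int) (l : Int) [] = [] := by
          unfold pvGoA
          rw [dif_neg (by omega)]
        rw [hempty]
        constructor
        · have : l + 1 - l = 1 := by omega
          rw [this]
          simp [List.range'_one, List.getD, List.getElem?_eq_getElem hln, pow_two]
        · simp

-- ===== VERDICT (by name: the statement is the Claim_ definition above) =====
theorem sortedSquaredArray1_spec : Claim_equal_sortedSquaredArray1 := by
  intro array _ hpre
  unfold Spec_sortedSquaredArray1 sortedSquaredArray1 sortedSquaredArray1_alt
  rcases array with _ | ⟨a, t⟩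
  · simp [pvGoA, PySem.List.sorted]
  · set arr := a :: t with harr
    have hlen : 1 ≤ arr.length := by simp [harr]
    have hcast : (arr.length : Int) - 1 = ((arr.length - 1 : Nat) : Int) := by omega
    rw [hcast]
    have hv : ∀ i j k : Nat, i ≤ j → j ≤ k → k < arr.length →
        |arr.getD j 0| ≤ max |arr.getD i 0| |arr.getD k 0| := by
      intro i j k hij hjk hk
      exact hpre k hk j (by omega) i (by omega)
    obtain ⟨hp, hsrt⟩ := pvGoA_main arr hv arr.length 0 (arr.length - 1)
      (by omega) (by omega) (by omega)
    have hmapeq : (List.range' 0 (arr.length - 1 + 1 - 0)).map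
        (fun k => arr.getD k 0 * arr.getD k 0) = arr.map (fun x => x * x) := by
      apply List.ext_getElem
      · simp; omega
      · intro i h1 h2
        have hi : i < arr.length := by simpa using h2
        simp [List.getElem_range', List.getD, List.getElem?_eq_getElem hi]
    rw [hmapeq] at hp
    exact (PySem.List.sorted_id_eq_of_perm_of_pairwise _ _ hp hsrt).symm
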